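-- pv_equiv track=rewrite | github.com/smohapatra1/scripting | python/practice/start_again/2024/07242024/simple_game.py | simpleGame4
-- ===== SOURCE A (Python) =====
-- MOD = 10**9+7
--
-- def over(n,k):
--     if k > n//2: k = n-k
--     above, below = 1, 1
--     for _ in range(k):
--         above = above * n % MOD
--         below = below * k % MOD
--         n, k = n-1, k-1
--     return above * pow(below, -1, MOD) % MOD
--
-- def simpleGame4(n,m):
--     nn = n-m
--     if nn & 1: return over(n-1, m-1)
--     nn //= 2
--     work = [0] * nn.bit_length()
--     for _ in range(nn.bit_length()):
--         if nn & (1<<_): work[_] = 2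
--     cnt = 0
--     for lst in rearrange(work, len(work)-1, m):
--         acc = 1
--         for i in lst: acc *= over(m,i)
--         cnt = (cnt + acc) % MOD
--     return (over(n-1, m-1) - cnt) % MOD
--
-- def rearrange(bits,top,m):
--     topbits = bits[top]
--     if top == 0:
--         if topbits <= m:
--             yield bits
--         return
--     if topbits == 0:
--         yield from rearrange(bits,top-1,m)
--         return
--     for shift in range(0,topbits+1,2):
--         if topbits-shift > m: continue
--         if topbits == 0: continue
--         newbits = bits[:]
--         newbits[top] -= shift
--         newbits[top-1] += 2* shift
--         yield from rearrange(newbits,top-1,m)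
-- ===== SOURCE B (Python) =====
-- # B: replaces A's generator enumeration of bit-redistribution configurations
-- # with a tabulated forward DP over bit positions (carry -> weight),
-- # keeping only the nonzero carry weights.
-- MOD = 10**9 + 7
--
-- def _binom(n, k):
--     # same value as A's over(n, k): falling factorial over factorial, mod MOD
--     if 2 * k > n:
--         k = n - k
--     num = den = 1
--     for j in range(k):
--         num = num * (n - j) % MOD
--         den = den * (k - j) % MOD
--     return num * pow(den, -1, MOD) % MOD
--
-- def simpleGame4(n, m):
--     total = _binom(n - 1, m - 1)
--     nn = n - m
--     if nn & 1:
--         return total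
--     half = nn // 2
--     bl = half.bit_length()
--     work = [2 if half & (1 << j) else 0 for j in range(bl)]
--     # weights[s] = (mod MOD) sum, over the kept-values chosen at positions above p,
--     # of the products of _binom(m, kept), for the choices pushing carry 4*s into p.
--     weights = [1]
--     for p in range(bl - 1, 0, -1):
--         nz = [(j, w) for j, w in enumerate(weights) if w]
--         weights = [sum(w * _binom(m, work[p] + 4 * j - 2 * s)
--                        for j, w in nz
--                        if 0 <= work[p] + 4 * j - 2 * s <= m) % MOD
--                    for s in range((work[p] + 4 * (len(weights) - 1)) // 2 + 1)]
--         while weights and weights[-1] == 0: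
--             weights.pop()
--     cnt = sum(w * _binom(m, work[0] + 4 * j)
--               for j, w in enumerate(weights)
--               if work[0] + 4 * j <= m) % MOD
--     return (total - cnt) % MOD
-- ===== Notes on version B (the rewrite author's own statement) =====
-- stated objective: alternative
-- what changed: Replaces A's recursive generator that explicitly enumerates every bit-redistribution configuration (copying and re-yielding bit lists, then multiplying binomials per configuration) with a tabulated forward DP over bit positions that keeps, per position, a vector of carry->weight sums of binomial products (only nonzero weights feed the next level).
import Mathlib
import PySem

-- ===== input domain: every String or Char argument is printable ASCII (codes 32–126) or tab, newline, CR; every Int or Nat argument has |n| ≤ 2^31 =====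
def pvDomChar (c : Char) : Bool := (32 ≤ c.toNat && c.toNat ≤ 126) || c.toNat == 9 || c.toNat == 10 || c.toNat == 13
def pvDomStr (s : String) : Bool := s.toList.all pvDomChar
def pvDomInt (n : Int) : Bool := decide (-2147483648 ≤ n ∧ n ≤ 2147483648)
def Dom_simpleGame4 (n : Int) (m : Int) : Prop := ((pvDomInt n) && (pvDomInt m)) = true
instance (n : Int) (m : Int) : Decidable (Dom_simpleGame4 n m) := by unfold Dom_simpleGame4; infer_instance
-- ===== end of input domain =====

-- B replaces A's recursive-generator enumeration of the bit-redistribution configurations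
-- by a tabulated forward DP over bit positions (carry -> weight vector); return values proved equal on Pre_.

-- ===== PORT A =====
def pvMOD : Int := 1000000007

-- pow(a, -1, p): modular inverse via Bézout coefficient (Int.gcdA); exact where Python's
-- pow(a, -1, p) is defined (gcd(a,p)=1); Pre_ excludes the inputs where Python raises.
def pvModInv (a p : Int) : Int := PySem.Int.mod (Int.gcdA a p) p

def pvOverLoop : Nat → Int → Int → Int → Int → Int × Int
  | 0, above, below, _, _ => (above, below)
  | t+1, above, below, n, k =>
      pvOverLoop t (PySem.Int.mod (above * n) pvMOD) (PySem.Int.mod (below * k) pvMOD) (n-1) (k-1)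

def pvOver (n k : Int) : Int :=
  let k' := if k > PySem.Int.floordiv n 2 then n - k else k
  let p := pvOverLoop k'.toNat 1 1 n k'
  PySem.Int.mod (p.1 * pvModInv p.2 pvMOD) pvMOD

-- rearrange(bits, top, m): the yielded lists, in order; top ≥ 0 and in range on every call A makes inside Pre_.
def rearrange (m : Int) : List Int → Nat → List (List Int)
  | bits, 0 =>
      if PySem.List.pyGetD bits 0 0 ≤ m then [bits] else []
  | bits, t+1 =>
      let topbits := PySem.List.pyGetD bits ((t:Int)+1) 0
      if topbits = 0 then rearrange m bits t
      else
        ((PySem.List.pyRange 0 (topbits+1) 2).map (fun shift =>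
          if topbits - shift > m then []
          else if topbits = 0 then []   -- Python's dead 'if topbits == 0: continue'
          else rearrange m ((bits.set (t+1) (topbits - shift)).set t
                 (PySem.List.pyGetD bits (t:Int) 0 + 2*shift)) t)).flatten

def simpleGame4 (n : Int) (m : Int) : Int :=
  let nn := n - m
  if PySem.Int.band nn 1 ≠ 0 then pvOver (n-1) (m-1)
  else
    let nn2 := PySem.Int.floordiv nn 2
    let bl := PySem.Int.bitLength nn2
    let work := (List.range bl).foldl
      (fun w j => if PySem.Int.band nn2 (2^j) ≠ 0 then w.set j 2 else w)
      (List.replicate bl (0:Int))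
    let cnt := (rearrange m work (bl-1)).foldl
      (fun cnt lst => PySem.Int.mod (cnt + lst.foldl (fun acc i => acc * pvOver m i) 1) pvMOD) 0
    PySem.Int.mod (pvOver (n-1) (m-1) - cnt) pvMOD

-- ===== PORT B =====
def binomAlt (n k : Int) : Int :=
  let k' := if 2*k > n then n - k else k
  let p := (PySem.List.pyRange 0 k' 1).foldl
    (fun nd j => (PySem.Int.mod (nd.1 * (n - j)) pvMOD, PySem.Int.mod (nd.2 * (k' - j)) pvMOD)) (1, 1)
  PySem.Int.mod (p.1 * pvModInv p.2 pvMOD) pvMOD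

-- one level of B's forward DP: carry->weight vector at position p+1 becomes the one at position p
def levelStep (m wk : Int) (weights : List Int) : List Int :=
  let nz := (PySem.List.enumerate weights 0).filter (fun jw => decide (jw.2 ≠ 0))
  (PySem.List.pyRange 0 (PySem.Int.floordiv (wk + 4*((weights.length:Int) - 1)) 2 + 1) 1).map
    (fun s => PySem.Int.mod
      ((nz.map (fun jw =>
          if 0 ≤ wk + 4*jw.1 - 2*s ∧ wk + 4*jw.1 - 2*s ≤ m then jw.2 * binomAlt m (wk + 4*jw.1 - 2*s) else 0)).sum)
      pvMOD)

-- 'while weights and weights[-1] == 0: weights.pop()' (drop trailing zeros)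
def pvTrimRev : List Int → List Int
  | [] => []
  | x :: rest => if x = 0 then pvTrimRev rest else x :: rest
def pvTrim (ws : List Int) : List Int := (pvTrimRev ws.reverse).reverse

def simpleGame4_alt (n : Int) (m : Int) : Int :=
  let total := binomAlt (n-1) (m-1)
  let nn := n - m
  if PySem.Int.band nn 1 ≠ 0 then total
  else
    let half := PySem.Int.floordiv nn 2
    let bl := PySem.Int.bitLength half
    let work := (List.range bl).map (fun j => if PySem.Int.band half (2^j) ≠ 0 then (2:Int) else 0)
    let weights := (PySem.List.pyRange ((bl:Int)-1) 0 (-1)).foldl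
      (fun ws p => pvTrim (levelStep m (PySem.List.pyGetD work p 0) ws)) [1]
    let cnt := PySem.Int.mod
      (((PySem.List.enumerate weights 0).map (fun jw =>
          if PySem.List.pyGetD work 0 0 + 4*jw.1 ≤ m then jw.2 * binomAlt m (PySem.List.pyGetD work 0 0 + 4*jw.1) else 0)).sum)
      pvMOD
    PySem.Int.mod (total - cnt) pvMOD

-- ===== PRECONDITION & SPEC =====
-- pvM0 n m: the largest value a bit-redistribution configuration can place at bit position 0,
-- namely 2 * (((n-m)//2) mod 2^bitlen((n-m)//2)) — Python semantics (floor division, % with positive modulus).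
def pvM0 (n m : Int) : Int :=
  let h := PySem.Int.floordiv (n - m) 2
  2 * PySem.Int.mod h (2 ^ PySem.Int.bitLength h)

-- Pre_ excludes exactly the inputs on which the Python A raises: (a) n = m, where work is empty and
-- bits[-1] raises IndexError; (b) inputs where over(n-1, m-1) has effective k ≥ MOD, so below = k! ≡ 0
-- and pow(below, -1, MOD) raises ValueError; and (c) even-branch inputs on which some enumerated
-- configuration contains a value v with min(v, m-v)-side ≥ MOD, so an inner over(m, v) raises that
-- same ValueError — characterised in closed form through pvM0 (achievable values are the evens up to
-- pvM0/2 at positions ≥ 1 and pvM0 mod 4 + 4k up to pvM0 at position 0, whence the alignment cases).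
def Pre_simpleGame4 (n : Int) (m : Int) : Prop :=
  n ≠ m ∧
  (if m - 1 > PySem.Int.floordiv (n-1) 2 then n - m else m - 1) < 1000000007 ∧
  (PySem.Int.band (n-m) 1 = 1 ∨
    ¬ (2000000015 ≤ m ∧ 1000000008 + PySem.Int.mod (pvM0 n m) 4 ≤ pvM0 n m ∧
       (2000000015 + PySem.Int.mod (pvM0 n m) 4 ≤ m ∨ 2000000018 ≤ pvM0 n m)))
instance (n : Int) (m : Int) : Decidable (Pre_simpleGame4 n m) := by unfold Pre_simpleGame4; infer_instance

def pvWitness_simpleGame4 : Int × Int := (10, 4)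

def Spec_simpleGame4 (n : Int) (m : Int) (out : Int) : Prop := out = simpleGame4_alt n m
instance (n : Int) (m : Int) (out : Int) : Decidable (Spec_simpleGame4 n m out) := by unfold Spec_simpleGame4; infer_instance

-- ===== CLAIM (what is proved, stated in full; the proofs are below) =====
def Claim_equal_simpleGame4 : Prop := ∀ (n : Int) (m : Int), Dom_simpleGame4 n m → Pre_simpleGame4 n m → Spec_simpleGame4 n m (simpleGame4 n m)

-- ===== LEMMAS AND PROOFS =====

-- backward value function of the configuration sum: pvF m work p v = sum, over all ways to
-- shift the value v at bit position p down through positions p-1..0, of the products of binomials kept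
def pvF (m : Int) (work : List Int) : Nat → Int → Int
  | 0, v => if v ≤ m then binomAlt m v else 0
  | p+1, v => ((List.range (v.toNat/2 + 1)).map (fun (s : Nat) =>
      if v - 2*(s:Int) ≤ m then binomAlt m (v - 2*(s:Int)) * pvF m work p (work.getD p 0 + 4*(s:Int)) else 0)).sum

-- weighted sum a carry->weight vector at position p represents
def pvE (m : Int) (work : List Int) (p : Nat) (ws : List Int) : Int :=
  ((List.range ws.length).map (fun j => ws.getD j 0 * pvF m work p (work.getD p 0 + 4*(j:Int)))).sum

theorem pvOverLoop_foldl : ∀ (t : Nat) (a b n k : Int),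
    pvOverLoop t a b n k
      = (List.range t).foldl (fun s (j : Nat) =>
          (PySem.Int.mod (s.1 * (n - (j:Int))) pvMOD, PySem.Int.mod (s.2 * (k - (j:Int))) pvMOD)) (a, b) := by
  intro t
  induction t with
  | zero => intro a b n k; rfl
  | succ t ih =>
    intro a b n k
    rw [List.range_succ_eq_map, List.foldl_cons, List.foldl_map]
    show pvOverLoop t (PySem.Int.mod (a * n) pvMOD) (PySem.Int.mod (b * k) pvMOD) (n-1) (k-1) = _
    rw [ih]
    have h1 : PySem.Int.mod (a * (n - (0:Nat))) pvMOD = PySem.Int.mod (a * n) pvMOD := by norm_num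
    have h2 : PySem.Int.mod (b * (k - (0:Nat))) pvMOD = PySem.Int.mod (b * k) pvMOD := by norm_num
    rw [h1, h2]
    apply PySem.List.foldl_congr_mem
    intro s j _
    have e1 : (n - 1) - (j:Int) = n - ((j.succ : Nat) : Int) := by push_cast; ring
    have e2 : (k - 1) - (j:Int) = k - ((j.succ : Nat) : Int) := by push_cast; ring
    rw [e1, e2]

theorem pvOver_eq_binomAlt (n k : Int) : pvOver n k = binomAlt n k := by
  have hc : (k > PySem.Int.floordiv n 2) ↔ (2*k > n) := by
    rw [PySem.Int.floordiv_eq_ediv_of_pos (by norm_num : (0:Int) < 2)]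
    constructor <;> (intro h; omega)
  simp only [pvOver, binomAlt, hc]
  set k' := if 2*k > n then n - k else k with hk'
  rw [pvOverLoop_foldl, PySem.List.pyRange_one]
  rw [List.foldl_map]
  have h0 : (k' - 0).toNat = k'.toNat := by norm_num
  rw [h0]
  apply congrArg (fun p : Int × Int => PySem.Int.mod (p.1 * pvModInv p.2 pvMOD) pvMOD)
  apply PySem.List.foldl_congr_mem
  intro s j _
  norm_num

theorem binomAlt_zero (m : Int) (hm : 0 ≤ m) : binomAlt m 0 = 1 := by
  simp only [binomAlt]
  rw [if_neg (by omega : ¬ ((2:Int)*0 > m))]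
  rw [PySem.List.pyRange_one_eq_nil (by omega), List.foldl_nil]
  decide

theorem pv_getD_nonneg (xs : List Int) (q : Nat) (h : ∀ x ∈ xs, 0 ≤ x) : 0 ≤ xs.getD q 0 := by
  rw [List.getD_eq_getElem?_getD]
  cases hx : xs[q]? with
  | none => simp
  | some v => simpa using h v (List.mem_of_getElem? hx)

theorem pv_getD_set_ne (l : List Int) (i q : Nat) (a : Int) (h : i ≠ q) :
    (l.set i a).getD q 0 = l.getD q 0 := by
  rw [List.getD_eq_getElem?_getD, List.getD_eq_getElem?_getD, List.getElem?_set_ne h]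

theorem pv_getD_set_self (l : List Int) (i : Nat) (a : Int) (h : i < l.length) :
    (l.set i a).getD i 0 = a := by
  rw [List.getD_eq_getElem?_getD, List.getElem?_set_self h]; rfl

theorem pv_pyRange_two (v : Int) (hv : 0 ≤ v) :
    PySem.List.pyRange 0 (v+1) 2 = (List.range (v.toNat/2 + 1)).map (fun (s : Nat) => 2*(s:Int)) := by
  rw [PySem.List.pyRange_of_pos 0 (v+1) (by norm_num), if_pos (by omega)]
  have h1 : ((v + 1 - 0 + 2 - 1)/2).toNat = v.toNat/2 + 1 := by omega
  rw [h1]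
  apply List.map_congr_left
  intro s _
  norm_num

theorem pv_idx_succ (xs : List Int) (t : Nat) :
    PySem.List.pyGetD xs ((t:Int)+1) 0 = xs.getD (t+1) 0 := by
  rw [show ((t:Int)+1) = (((t+1:Nat)):Int) by push_cast; ring, PySem.List.pyGetD_natCast]

theorem rearrange_nil_of_neg (m : Int) (hm : m < 0) :
    ∀ (p : Nat) (bits : List Int), (∀ x ∈ bits, 0 ≤ x) → rearrange m bits p = [] := by
  intro p
  induction p with
  | zero =>
    intro bits hb
    simp only [rearrange]
    rw [if_neg]
    have h0 : PySem.List.pyGetD bits 0 0 = bits.getD 0 0 := by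
      exact_mod_cast PySem.List.pyGetD_natCast bits 0 0
    rw [h0]
    have := pv_getD_nonneg bits 0 hb
    omega
  | succ t ih =>
    intro bits hb
    simp only [rearrange]
    rw [pv_idx_succ bits t]
    by_cases hz : bits.getD (t+1) 0 = 0
    · rw [if_pos hz]; exact ih bits hb
    · rw [if_neg hz]
      have hv0 : 0 ≤ bits.getD (t+1) 0 := pv_getD_nonneg bits (t+1) hb
      apply List.flatten_eq_nil_iff.mpr
      intro l hl
      rcases List.mem_map.mp hl with ⟨shift, hs, rfl⟩
      rcases (PySem.List.mem_pyRange_iff_of_pos (by norm_num) shift).mp hs with ⟨h1, h2, _⟩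
      rw [if_pos (by omega)]

theorem sumProd_rearrange (m : Int) (work : List Int) (hm : 0 ≤ m)
    (hw : ∀ x ∈ work, 0 ≤ x) :
    ∀ (p : Nat) (bits : List Int), p < bits.length → bits.length = work.length →
      (∀ q, q < p → bits.getD q 0 = work.getD q 0) → (∀ x ∈ bits, 0 ≤ x) →
      ((rearrange m bits p).map (fun lst => (lst.map (fun i => binomAlt m i)).prod)).sum
        = ((bits.drop (p+1)).map (fun i => binomAlt m i)).prod * pvF m work p (bits.getD p 0) := by
  intro p
  induction p with
  | zero =>
    intro bits h1 _ _ _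
    simp only [rearrange, pvF]
    have h0 : PySem.List.pyGetD bits 0 0 = bits.getD 0 0 := by
      exact_mod_cast PySem.List.pyGetD_natCast bits 0 0
    rw [h0]
    cases bits with
    | nil => simp at h1
    | cons b bs =>
      by_cases hb : b ≤ m
      · simp only [List.getD_cons_zero, if_pos hb]
        simp [mul_comm]
      · simp only [List.getD_cons_zero, if_neg hb]
        simp
  | succ t ih =>
    intro bits h1 h2 h3 h4
    simp only [rearrange]
    rw [pv_idx_succ bits t]
    set v := bits.getD (t+1) 0 with hvdef
    have hv0 : 0 ≤ v := pv_getD_nonneg bits (t+1) h4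
    have hvelt : v = bits[t+1]'h1 := by
      rw [hvdef, List.getD_eq_getElem bits 0 h1]
    have hdrop : bits.drop (t+1) = v :: bits.drop (t+2) := by
      rw [List.drop_eq_getElem_cons h1, ← hvelt]
    by_cases hz : v = 0
    · rw [if_pos hz]
      rw [ih bits (by omega) h2 (fun q hq => h3 q (by omega)) h4]
      rw [hdrop, List.map_cons, List.prod_cons, hz]
      have hF : pvF m work (t+1) 0 = pvF m work t (work.getD t 0) := by
        simp [pvF, hm, binomAlt_zero m hm]
      rw [hF, h3 t (by omega), binomAlt_zero m hm]
      ring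
    · rw [if_neg hz]
      rw [List.map_flatten, List.sum_flatten, List.map_map, List.map_map]
      rw [pv_pyRange_two v hv0, List.map_map]
      simp only [pvF]
      rw [show t + 1 + 1 = t + 2 from by omega]
      rw [← List.sum_map_mul_left]
      apply congrArg
      apply List.map_congr_left
      intro s hsmem
      have hs : s < v.toNat/2 + 1 := List.mem_range.mp hsmem
      have h2s : 2*(s:Int) ≤ v := by omega
      simp only [Function.comp]
      by_cases hcond : v - 2*(s:Int) ≤ m
      · rw [if_neg (by omega : ¬ (v - 2*(s:Int) > m)), if_neg hz, if_pos hcond]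
        -- the recursive call on the updated bits
        set nb := (bits.set (t+1) (v - 2*(s:Int))).set t
            (PySem.List.pyGetD bits (t:Int) 0 + 2*(2*(s:Int))) with hnb
        have hgb : PySem.List.pyGetD bits (t:Int) 0 = bits.getD t 0 := by
          exact_mod_cast PySem.List.pyGetD_natCast bits t 0
        have hlen : nb.length = bits.length := by
          rw [hnb, List.length_set, List.length_set]
        have hnb_q : ∀ q, q < t → nb.getD q 0 = work.getD q 0 := by
          intro q hq
          rw [hnb, pv_getD_set_ne _ _ _ _ (by omega), pv_getD_set_ne _ _ _ _ (by omega)]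
          exact h3 q (by omega)
        have hnb_nonneg : ∀ x ∈ nb, 0 ≤ x := by
          intro x hx
          rcases List.mem_or_eq_of_mem_set hx with hx' | rfl
          · rcases List.mem_or_eq_of_mem_set hx' with hx'' | rfl
            · exact h4 x hx''
            · omega
          · have := pv_getD_nonneg bits t h4
            rw [hgb]; omega
        have hnb_t : nb.getD t 0 = work.getD t 0 + 4*(s:Int) := by
          rw [hnb, pv_getD_set_self _ _ _ (by rw [List.length_set]; omega), hgb,
              h3 t (by omega)]
          ring
        rw [ih nb (by omega) (by rw [hlen, h2]) hnb_q hnb_nonneg, hnb_t]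
        have hnb_drop : nb.drop (t+1) = (v - 2*(s:Int)) :: bits.drop (t+2) := by
          rw [hnb, List.drop_set, if_pos (by omega), List.drop_set, if_neg (by omega)]
          have : (t+1) - (t+1) = 0 := by omega
          rw [this, List.drop_eq_getElem_cons h1, ← hvelt, List.set_cons_zero]
        rw [hnb_drop, List.map_cons, List.prod_cons]
        ring
      · rw [if_pos (by omega : v - 2*(s:Int) > m), if_neg hcond]
        simp

-- the inner per-target-carry sum of one DP level, with the enumerate/pyRange plumbing removed
def pvInner (m wk : Int) (ws : List Int) (s : Nat) : Int :=
  ((List.range ws.length).map (fun (j : Nat) =>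
    if ws.getD j 0 ≠ 0 ∧ 0 ≤ wk + 4*(j:Int) - 2*(s:Int) ∧ wk + 4*(j:Int) - 2*(s:Int) ≤ m
    then ws.getD j 0 * binomAlt m (wk + 4*(j:Int) - 2*(s:Int)) else 0)).sum

theorem pv_sum_filter {α : Type} (l : List α) (p : α → Bool) (f : α → Int) :
    ((l.filter p).map f).sum = (l.map (fun x => if p x then f x else 0)).sum := by
  induction l with
  | nil => rfl
  | cons x l ih =>
    rw [List.filter_cons]
    by_cases hx : p x <;> simp [hx, ih]

theorem pv_list_sum_range (n : Nat) (f : Nat → Int) :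
    ((List.range n).map f).sum = ∑ s ∈ Finset.range n, f s := rfl

theorem pv_sum_modeq {α : Type} (M : Int) (l : List α) (f g : α → Int)
    (h : ∀ x ∈ l, f x ≡ g x [ZMOD M]) : (l.map f).sum ≡ (l.map g).sum [ZMOD M] := by
  induction l with
  | nil => rfl
  | cons x l ih =>
    simp only [List.map_cons, List.sum_cons]
    exact Int.ModEq.add (h x List.mem_cons_self) (ih (fun y hy => h y (List.mem_cons_of_mem x hy)))

theorem pv_mod_modeq (x : Int) : PySem.Int.mod x pvMOD ≡ x [ZMOD pvMOD] := by
  rw [PySem.Int.mod_eq_emod_of_pos (by decide : (0:Int) < pvMOD)]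
  exact Int.emod_emod_of_dvd x dvd_rfl

theorem pv_getD_map_range (g : Nat → Int) (n q : Nat) (hq : q < n) :
    ((List.range n).map g).getD q 0 = g q := by
  rw [List.getD_eq_getElem _ _ (by simpa using hq)]
  simp

theorem pv_enumerate_map_sum (ws : List Int) (f : Int × Int → Int) :
    ((PySem.List.enumerate ws 0).map f).sum
      = ((List.range ws.length).map (fun (j : Nat) => f ((j:Int), ws.getD j 0))).sum := by
  rw [PySem.List.enumerate_eq_map_pyRange ws 0, List.map_map,
      PySem.List.pyRange_one, List.map_map, sub_zero]
  have hlen : (PySem.List.len ws).toNat = ws.length := by simp [PySem.List.len_eq]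
  rw [hlen]
  apply congrArg
  apply List.map_congr_left
  intro j _
  simp [PySem.List.pyGetD_natCast]

theorem pv_levelStep_eq (m wk : Int) (ws : List Int) :
    levelStep m wk ws
      = (List.range (PySem.Int.floordiv (wk + 4*((ws.length:Int) - 1)) 2 + 1).toNat).map
          (fun (s : Nat) => PySem.Int.mod (pvInner m wk ws s) pvMOD) := by
  simp only [levelStep]
  rw [PySem.List.pyRange_one, List.map_map, sub_zero]
  apply List.map_congr_left
  intro s _
  simp only [Function.comp, zero_add]
  congr 1
  rw [pv_sum_filter, pv_enumerate_map_sum]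
  unfold pvInner
  apply congrArg
  apply List.map_congr_left
  intro j _
  simp only [decide_eq_true_eq]
  by_cases h1 : ws.getD j 0 ≠ 0
  · by_cases h2 : 0 ≤ wk + 4*(j:Int) - 2*(s:Int) ∧ wk + 4*(j:Int) - 2*(s:Int) ≤ m
    · rw [if_pos h1, if_pos h2, if_pos ⟨h1, h2⟩]
    · rw [if_pos h1, if_neg h2, if_neg (fun h => h2 h.2)]
  · rw [if_neg h1, if_neg (fun h => h1 h.1)]

theorem levelStep_E (m : Int) (work : List Int) (hm : 0 ≤ m) (hw : ∀ x ∈ work, 0 ≤ x)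
    (p : Nat) (ws : List Int) :
    pvE m work p (levelStep m (work.getD (p+1) 0) ws) ≡ pvE m work (p+1) ws [ZMOD pvMOD] := by
  have hwk0 : 0 ≤ work.getD (p+1) 0 := pv_getD_nonneg _ _ hw
  set wk := work.getD (p+1) 0 with hwk
  set L := ws.length with hL
  set B := PySem.Int.floordiv (wk + 4*((L:Int) - 1)) 2 + 1 with hB
  have hBe : B = (wk + 4*((L:Int) - 1))/2 + 1 := by
    rw [hB, PySem.Int.floordiv_eq_ediv_of_pos (by norm_num : (0:Int) < 2)]
  have h1 : pvE m work p (levelStep m wk ws)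
      = ((List.range B.toNat).map (fun (s : Nat) =>
          PySem.Int.mod (pvInner m wk ws s) pvMOD * pvF m work p (work.getD p 0 + 4*(s:Int)))).sum := by
    rw [pv_levelStep_eq]
    unfold pvE
    rw [List.length_map, List.length_range]
    apply congrArg
    apply List.map_congr_left
    intro s hs
    rw [pv_getD_map_range _ _ _ (List.mem_range.mp hs)]
  have h2 : ((List.range B.toNat).map (fun (s : Nat) =>
          PySem.Int.mod (pvInner m wk ws s) pvMOD * pvF m work p (work.getD p 0 + 4*(s:Int)))).sum
      ≡ ((List.range B.toNat).map (fun (s : Nat) =>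
          pvInner m wk ws s * pvF m work p (work.getD p 0 + 4*(s:Int)))).sum [ZMOD pvMOD] := by
    apply pv_sum_modeq
    intro s _
    exact Int.ModEq.mul_right _ (pv_mod_modeq _)
  have h3 : ((List.range B.toNat).map (fun (s : Nat) =>
          pvInner m wk ws s * pvF m work p (work.getD p 0 + 4*(s:Int)))).sum
      = pvE m work (p+1) ws := by
    unfold pvE pvInner
    simp only [pv_list_sum_range, Finset.sum_mul]
    rw [Finset.sum_comm]
    apply Finset.sum_congr rfl
    intro j hj
    have hjL : j < L := Finset.mem_range.mp hj
    have hvj0 : 0 ≤ wk + 4*(j:Int) := by omega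
    have hKB : (wk + 4*(j:Int)).toNat/2 + 1 ≤ B.toNat := by
      rw [hBe]; omega
    simp only [pvF]
    rw [pv_list_sum_range, Finset.mul_sum]
    by_cases hw0 : ws.getD j 0 = 0
    · rw [Finset.sum_eq_zero (fun s _ => by
        rw [ite_mul, zero_mul, if_neg (fun h => h.1 hw0)])]
      rw [Finset.sum_eq_zero (fun s _ => by rw [hw0]; ring)]
    rw [← Finset.sum_subset
          (fun x hx => Finset.mem_range.mpr (lt_of_lt_of_le (Finset.mem_range.mp hx) hKB)) ?van]
    case van =>
      intro s _ hs
      have hsK : (wk + 4*(j:Int)).toNat/2 + 1 ≤ s := by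
        by_contra hcon
        exact hs (Finset.mem_range.mpr (by omega))
      rw [ite_mul, zero_mul, if_neg (by rintro ⟨-, h2, -⟩; omega)]
    apply Finset.sum_congr rfl
    intro s hs
    have hsK : s < (wk + 4*(j:Int)).toNat/2 + 1 := Finset.mem_range.mp hs
    have h2s : 2*(s:Int) ≤ wk + 4*(j:Int) := by omega
    rw [ite_mul, zero_mul]
    by_cases hc : wk + 4*(j:Int) - 2*(s:Int) ≤ m
    · rw [if_pos ⟨hw0, by omega, hc⟩, if_pos hc]
      ring
    · rw [if_neg (by tauto), if_neg hc]
      ring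
  have h4 := h2
  rw [h3] at h4
  rw [h1]
  exact h4

theorem pvE_append_zero (m : Int) (work : List Int) (p : Nat) (ws : List Int) :
    pvE m work p (ws ++ [0]) = pvE m work p ws := by
  unfold pvE
  rw [List.length_append, List.length_cons, List.length_nil, List.range_succ,
      List.map_append, List.sum_append]
  have hlast : ((ws ++ [0]).getD ws.length 0 : Int) = 0 := by
    rw [List.getD_eq_getElem?_getD]
    simp
  rw [List.map_cons, List.map_nil, List.sum_cons, List.sum_nil, hlast, zero_mul,
      add_zero, add_zero]
  apply congrArg
  apply List.map_congr_left
  intro j hj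
  have hjl : j < ws.length := List.mem_range.mp hj
  rw [List.getD_eq_getElem?_getD, List.getD_eq_getElem?_getD,
      List.getElem?_append_left hjl, List.getD_eq_getElem?_getD]

theorem pvE_trimRev (m : Int) (work : List Int) (p : Nat) :
    ∀ (l : List Int), pvE m work p ((pvTrimRev l).reverse) = pvE m work p l.reverse := by
  intro l
  induction l with
  | nil => rfl
  | cons x rest ih =>
    simp only [pvTrimRev]
    by_cases hx : x = 0
    · rw [if_pos hx, ih, List.reverse_cons, hx, pvE_append_zero]
    · rw [if_neg hx]

theorem pvE_trim (m : Int) (work : List Int) (p : Nat) (ws : List Int) :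
    pvE m work p (pvTrim ws) = pvE m work p ws := by
  unfold pvTrim
  have h := pvE_trimRev m work p ws.reverse
  rwa [List.reverse_reverse] at h

theorem weights_E (m : Int) (work : List Int) (hm : 0 ≤ m) (hw : ∀ x ∈ work, 0 ≤ x) :
    ∀ (p : Nat) (ws : List Int),
      pvE m work 0 ((PySem.List.pyRange (p:Int) 0 (-1)).foldl
          (fun ws q => pvTrim (levelStep m (PySem.List.pyGetD work q 0) ws)) ws)
        ≡ pvE m work p ws [ZMOD pvMOD] := by
  intro p
  induction p with
  | zero =>
    intro ws
    rw [PySem.List.pyRange_neg_one_eq_nil (by norm_num)]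
    rfl
  | succ t ih =>
    intro ws
    rw [PySem.List.pyRange_neg_one_cons (by push_cast; omega : (0:Int) < ((t+1 : Nat) : Int))]
    rw [List.foldl_cons]
    have hidx : PySem.List.pyGetD work ((t+1 : Nat) : Int) 0 = work.getD (t+1) 0 :=
      PySem.List.pyGetD_natCast work (t+1) 0
    have hpred : ((t+1 : Nat) : Int) - 1 = (t : Int) := by push_cast; ring
    rw [hidx, hpred]
    refine (ih (pvTrim (levelStep m (work.getD (t+1) 0) ws))).trans ?_
    rw [pvE_trim]
    exact levelStep_E m work hm hw t ws

theorem foldl_set_spec (P : Nat → Prop) [DecidablePred P] :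
    ∀ (js : List Nat) (L : List Int),
      (js.foldl (fun w j => if P j then w.set j 2 else w) L).length = L.length ∧
      ∀ (q : Nat), (js.foldl (fun w j => if P j then w.set j 2 else w) L)[q]?
        = if P q ∧ q ∈ js ∧ q < L.length then some 2 else L[q]? := by
  intro js
  induction js with
  | nil => intro L; refine ⟨rfl, fun q => ?_⟩; simp
  | cons j js ih =>
    intro L
    rw [List.foldl_cons]
    set L' := if P j then L.set j 2 else L with hL'
    have hlen : L'.length = L.length := by
      rw [hL']; split <;> simp
    obtain ⟨ihl, ihg⟩ := ih L'
    refine ⟨by rw [ihl, hlen], fun q => ?_⟩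
    rw [ihg q, hlen]
    by_cases hq : P q ∧ q ∈ js ∧ q < L.length
    · rw [if_pos hq, if_pos ⟨hq.1, List.mem_cons_of_mem j hq.2.1, hq.2.2⟩]
    · rw [if_neg hq]
      by_cases hj : q = j ∧ P j ∧ q < L.length
      · have : L'[q]? = some 2 := by
          rw [hL', if_pos hj.2.1, hj.1]
          rw [List.getElem?_set_self (by rw [← hj.1]; exact hj.2.2)]
        rw [this, if_pos ⟨hj.1 ▸ hj.2.1, by rw [hj.1]; exact List.mem_cons_self, hj.2.2⟩]
      · have hLq : L'[q]? = L[q]? := by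
          rw [hL']
          by_cases hpj : P j
          · rw [if_pos hpj]
            by_cases hqj : q = j
            · have : ¬ q < L.length := fun h => hj ⟨hqj, hpj, h⟩
              rw [List.getElem?_eq_none (by rw [List.length_set]; omega),
                  List.getElem?_eq_none (by omega)]
            · exact List.getElem?_set_ne (fun h => hqj h.symm)
          · rw [if_neg hpj]
        rw [hLq]
        by_cases hc : P q ∧ q ∈ j :: js ∧ q < L.length
        · exfalso
          rcases List.mem_cons.mp hc.2.1 with h | h
          · exact hj ⟨h, h ▸ hc.1, hc.2.2⟩
          · exact hq ⟨hc.1, h, hc.2.2⟩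
        · rw [if_neg hc]

theorem work_eq (c : Int) (bl : Nat) :
    (List.range bl).foldl (fun w j => if PySem.Int.band c (2^j) ≠ 0 then w.set j 2 else w)
        (List.replicate bl (0:Int))
      = (List.range bl).map (fun j => if PySem.Int.band c (2^j) ≠ 0 then (2:Int) else 0) := by
  obtain ⟨hl, hg⟩ := foldl_set_spec (fun j => PySem.Int.band c (2^j) ≠ 0) (List.range bl)
      (List.replicate bl (0:Int))
  apply List.ext_getElem?
  intro q
  rw [hg q]
  by_cases hq : q < bl
  · by_cases hp : PySem.Int.band c (2^q) ≠ 0 <;>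
      simp [hq, hp]
  · simp [hq]

theorem foldl_mod_add (g : List Int → Int) :
    ∀ (L : List (List Int)) (c : Int),
      L.foldl (fun cnt lst => PySem.Int.mod (cnt + g lst) pvMOD) (PySem.Int.mod c pvMOD)
        = PySem.Int.mod (c + (L.map g).sum) pvMOD := by
  intro L
  induction L with
  | nil => intro c; simp
  | cons x L ih =>
    intro c
    rw [List.foldl_cons]
    have h : PySem.Int.mod (PySem.Int.mod c pvMOD + g x) pvMOD = PySem.Int.mod (c + g x) pvMOD := by
      rw [PySem.Int.mod_eq_emod_of_pos (by decide : (0:Int) < pvMOD),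
          PySem.Int.mod_eq_emod_of_pos (by decide : (0:Int) < pvMOD),
          PySem.Int.mod_eq_emod_of_pos (by decide : (0:Int) < pvMOD),
          Int.emod_add_emod]
    rw [h, ih (c + g x)]
    rw [List.map_cons, List.sum_cons]
    ring_nf

theorem prod_foldl (m : Int) (lst : List Int) :
    lst.foldl (fun acc i => acc * pvOver m i) 1 = (lst.map (fun i => binomAlt m i)).prod := by
  rw [List.prod_eq_foldl, List.foldl_map]
  apply PySem.List.foldl_congr_mem
  intro acc i _
  rw [pvOver_eq_binomAlt]

theorem cnt_fold_eq (m : Int) (L : List (List Int)) :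
    L.foldl (fun cnt lst => PySem.Int.mod (cnt + lst.foldl (fun acc i => acc * pvOver m i) 1) pvMOD) 0
      = PySem.Int.mod ((L.map (fun lst => (lst.map (fun i => binomAlt m i)).prod)).sum) pvMOD := by
  have h0 : (0 : Int) = PySem.Int.mod 0 pvMOD := by decide
  rw [h0]
  have := foldl_mod_add (fun lst => lst.foldl (fun acc i => acc * pvOver m i) 1) L 0
  rw [this, zero_add]
  congr 1
  apply congrArg
  apply List.map_congr_left
  intro lst _
  exact prod_foldl m lst

theorem pv_mod_eq_of_modeq {x y : Int} (h : x ≡ y [ZMOD pvMOD]) :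
    PySem.Int.mod x pvMOD = PySem.Int.mod y pvMOD := by
  rw [PySem.Int.mod_eq_emod_of_pos (by decide : (0:Int) < pvMOD),
      PySem.Int.mod_eq_emod_of_pos (by decide : (0:Int) < pvMOD)]
  exact h

theorem cnt_eq (m : Int) (work : List Int) (hwork : ∀ x ∈ work, 0 ≤ x) (hlen : 1 ≤ work.length) :
    (rearrange m work (work.length-1)).foldl
        (fun cnt lst => PySem.Int.mod (cnt + lst.foldl (fun acc i => acc * pvOver m i) 1) pvMOD) 0
      = PySem.Int.mod
          (((PySem.List.enumerate ((PySem.List.pyRange ((work.length:Int)-1) 0 (-1)).foldl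
              (fun ws p => pvTrim (levelStep m (PySem.List.pyGetD work p 0) ws)) [1]) 0).map (fun jw =>
            if PySem.List.pyGetD work 0 0 + 4*jw.1 ≤ m
            then jw.2 * binomAlt m (PySem.List.pyGetD work 0 0 + 4*jw.1) else 0)).sum)
          pvMOD := by
  have hg0 : PySem.List.pyGetD work 0 0 = work.getD 0 0 := by
    exact_mod_cast PySem.List.pyGetD_natCast work 0 0
  rw [cnt_fold_eq]
  by_cases hm : 0 ≤ m
  · -- main case: both sides are (pvF at the top bit) mod MOD
    rw [sumProd_rearrange m work hm hwork (work.length-1) work (by omega) rfl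
        (fun q _ => rfl) hwork]
    rw [show work.length - 1 + 1 = work.length from by omega, List.drop_length]
    rw [List.map_nil, List.prod_nil, one_mul]
    have hcast : ((work.length:Int) - 1) = (((work.length - 1 : Nat)):Int) := by omega
    rw [hcast]
    set weights := (PySem.List.pyRange (((work.length - 1 : Nat)):Int) 0 (-1)).foldl
        (fun ws p => pvTrim (levelStep m (PySem.List.pyGetD work p 0) ws)) [1] with hwts
    have hS : ((PySem.List.enumerate weights 0).map (fun jw =>
            if PySem.List.pyGetD work 0 0 + 4*jw.1 ≤ m
            then jw.2 * binomAlt m (PySem.List.pyGetD work 0 0 + 4*jw.1) else 0)).sum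
        = pvE m work 0 weights := by
      rw [pv_enumerate_map_sum]
      unfold pvE
      apply congrArg
      apply List.map_congr_left
      intro j _
      rw [hg0]
      simp only [pvF]
      by_cases hc : work.getD 0 0 + 4*(j:Int) ≤ m
      · rw [if_pos hc, if_pos hc]
      · rw [if_neg hc, if_neg hc]
        ring
    rw [hS]
    have hE1 : pvE m work (work.length - 1) [1]
        = pvF m work (work.length - 1) (work.getD (work.length - 1) 0) := by
      simp [pvE]
    apply pv_mod_eq_of_modeq
    have hW := weights_E m work hm hwork (work.length - 1) [1]
    rw [hE1] at hW
    exact hW.symm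
  · -- m < 0: no configuration survives on either side; both counts are 0
    rw [rearrange_nil_of_neg m (by omega) (work.length-1) work hwork]
    rw [List.map_nil, List.sum_nil]
    have hz : ((PySem.List.enumerate ((PySem.List.pyRange ((work.length:Int)-1) 0 (-1)).foldl
              (fun ws p => pvTrim (levelStep m (PySem.List.pyGetD work p 0) ws)) [1]) 0).map (fun jw =>
            if PySem.List.pyGetD work 0 0 + 4*jw.1 ≤ m
            then jw.2 * binomAlt m (PySem.List.pyGetD work 0 0 + 4*jw.1) else 0)).sum = 0 := by
      apply List.sum_eq_zero
      intro x hx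
      rcases List.mem_map.mp hx with ⟨jw, hjw, rfl⟩
      rcases (PySem.List.mem_enumerate_iff _ 0 jw).mp hjw with ⟨k, hk, rfl⟩
      have h1 : 0 ≤ work.getD 0 0 := pv_getD_nonneg work 0 hwork
      rw [hg0, if_neg (by push_cast; omega)]
    rw [hz]

-- ===== VERDICT (by name: the statement is the Claim_ definition above) =====
theorem simpleGame4_spec : Claim_equal_simpleGame4 := by
  intro n m hdom hpre
  unfold Pre_simpleGame4 at hpre
  obtain ⟨hnm, hkeff, hinner⟩ := hpre
  unfold Spec_simpleGame4
  by_cases hodd : PySem.Int.band (n - m) 1 ≠ 0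
  · simp only [simpleGame4, simpleGame4_alt, if_pos hodd]
    exact pvOver_eq_binomAlt (n-1) (m-1)
  · simp only [simpleGame4, simpleGame4_alt, if_neg hodd]
    rw [pvOver_eq_binomAlt (n-1) (m-1)]
    rw [work_eq (PySem.Int.floordiv (n-m) 2) (PySem.Int.bitLength (PySem.Int.floordiv (n-m) 2))]
    set c := PySem.Int.floordiv (n-m) 2 with hc
    set bl := PySem.Int.bitLength c with hbl
    set work := (List.range bl).map (fun j => if PySem.Int.band c (2^j) ≠ 0 then (2:Int) else 0)
      with hwork
    have hwl : work.length = bl := by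
      rw [hwork, List.length_map, List.length_range]
    have hnn0 : n - m ≠ 0 := fun h => hnm (by omega)
    have heven : (2:Int) ∣ (n - m) := by
      have h0 : PySem.Int.band (n-m) 1 = 0 := by omega
      rw [PySem.Int.band_one] at h0
      exact (PySem.Int.mod_eq_zero_iff_dvd (n-m) 2).mp h0
    have hc0 : c ≠ 0 := by
      rw [hc, PySem.Int.floordiv_eq_ediv_of_pos (by norm_num : (0:Int) < 2)]
      omega
    have hbl1 : 1 ≤ bl := by
      by_contra hcon
      have hlt := PySem.Int.lt_two_pow_bitLength c
      rw [← hbl] at hlt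
      have hble : bl = 0 := by omega
      rw [hble, pow_zero] at hlt
      have : c.natAbs = 0 := by omega
      exact hc0 (by omega)
    have hnneg : ∀ x ∈ work, 0 ≤ x := by
      intro x hx
      rcases List.mem_map.mp hx with ⟨j, _, rfl⟩
      split <;> norm_num
    rw [← hwl]
    rw [cnt_eq m work hnneg (by omega)]
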